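-- pv_equiv track=rewrite | github.com/NouhaylaEdDarraz/tp | chef-oui-chef.py | verifier_salut
-- ===== SOURCE A (Python) =====
-- def verifier_salut(corridor):
--     if not isinstance(corridor, str):
--         return 0
--
--     nombre_saluts = 0
--     officiers_gauche = 0
--
--     for char in corridor:
--         if char == '>':
--             officiers_gauche += 1
--         elif char == '<':
--             nombre_saluts += officiers_gauche
--
--     return nombre_saluts
-- ===== SOURCE B (Python) =====
-- def verifier_salut(corridor):
--     if not isinstance(corridor, str):
--         return 0
--     return sum(1 for j, c in enumerate(corridor) if c == '<'
--                  for d in corridor[:j] if d == '>')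
-- ===== Notes on version B (the rewrite author's own statement) =====
-- stated objective: alternative
-- what changed: Replaces the single left-to-right pass with a running '>' counter by a nested comprehension that, for every '<' at index j, counts the '>' characters in the prefix corridor[:j] and sums them.
import Mathlib
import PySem

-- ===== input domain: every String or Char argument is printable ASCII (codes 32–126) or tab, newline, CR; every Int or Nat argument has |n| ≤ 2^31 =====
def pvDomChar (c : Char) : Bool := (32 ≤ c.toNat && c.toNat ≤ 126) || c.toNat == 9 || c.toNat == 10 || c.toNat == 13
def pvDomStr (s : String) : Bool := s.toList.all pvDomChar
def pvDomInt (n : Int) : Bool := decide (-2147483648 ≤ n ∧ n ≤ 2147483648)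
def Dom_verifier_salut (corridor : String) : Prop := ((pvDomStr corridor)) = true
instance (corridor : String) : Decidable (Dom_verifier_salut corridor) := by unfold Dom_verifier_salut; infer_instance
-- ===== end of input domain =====

-- B replaces A's single pass with a running counter by a nested pair-counting sum
-- (for each '<' at index j, count the '>' in corridor[:j]); equal value, different control flow.

-- ===== PORT A =====
-- A's loop state: (nombre_saluts, officiers_gauche)
def pvAStep (st : Int × Int) (c : Char) : Int × Int :=
  if c = '>' then (st.1, st.2 + 1)
  else if c = '<' then (st.1 + st.2, st.2)
  else st

def verifier_salut (corridor : String) : Int :=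
  -- isinstance(corridor, str) is always true for a String argument
  (corridor.toList.foldl pvAStep (0, 0)).1

-- ===== PORT B =====
def verifier_salut_alt (corridor : String) : Int :=
  -- sum(1 for j, c in enumerate(corridor) if c == '<' for d in corridor[:j] if d == '>')
  (PySem.List.enumerate corridor.toList 0).foldl
    (fun acc jc =>
      if jc.2 = '<' then
        (PySem.List.slice corridor.toList none (some jc.1)).foldl
          (fun a d => if d = '>' then a + 1 else a) acc
      else acc) 0

-- ===== PRECONDITION & SPEC =====
def Spec_verifier_salut (corridor : String) (out : Int) : Prop := out = verifier_salut_alt corridor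
instance (corridor : String) (out : Int) : Decidable (Spec_verifier_salut corridor out) := by unfold Spec_verifier_salut; infer_instance

-- ===== CLAIM (what is proved, stated in full; the proofs are below) =====
def Claim_equal_verifier_salut : Prop := ∀ (corridor : String), Dom_verifier_salut corridor → Spec_verifier_salut corridor (verifier_salut corridor)

-- ===== LEMMAS AND PROOFS =====

-- B's nested sum, parameterised by the list the slices are taken from
def pvBSum (full l : List Char) (s : Int) : Int :=
  (PySem.List.enumerate l 0).foldl
    (fun acc jc =>
      if jc.2 = '<' then
        (PySem.List.slice full none (some jc.1)).foldl
          (fun a d => if d = '>' then a + 1 else a) acc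
      else acc) s

theorem pvA_snd (l : List Char) (s g : Int) :
    (l.foldl pvAStep (s, g)).2 = g + (l.count '>' : Int) := by
  induction l generalizing s g with
  | nil => simp
  | cons c t ih =>
    simp only [List.foldl_cons, List.count_cons, pvAStep]
    by_cases h : c = '>'
    · simp [h, ih]; ring
    · by_cases h2 : c = '<' <;> simp [h, h2, ih]

theorem pvBSum_congr (full full' l : List Char)
    (hpre : ∀ k : Nat, k ≤ l.length → full.take k = full'.take k)
    (s : Int) : pvBSum full l s = pvBSum full' l s := by
  unfold pvBSum
  apply PySem.List.foldl_congr_mem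
  intro acc jc hjc
  rcases (PySem.List.mem_enumerate_iff l 0 jc).1 hjc with ⟨k, hk, rfl⟩
  simp only [zero_add, PySem.List.slice_to_natCast, hpre k (le_of_lt hk)]

theorem pvBSum_append (full l : List Char) (c : Char) (s : Int)
    (h : full = l ++ [c]) :
    pvBSum full (l ++ [c]) s =
      (if c = '<' then pvBSum full l s + (l.count '>' : Int) else pvBSum full l s) := by
  unfold pvBSum
  rw [PySem.List.enumerate_append, List.foldl_append]
  simp only [PySem.List.enumerate_cons, PySem.List.enumerate_nil, List.foldl_cons, List.foldl_nil,
    zero_add]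
  have hsl : PySem.List.slice full none (some ((l.length : Nat) : Int)) = l := by
    rw [PySem.List.slice_to_natCast, h]
    simp
  by_cases hc : c = '<'
  · rw [if_pos hc, if_pos hc, hsl, PySem.List.foldl_ite_add_one]
    congr 1
  · rw [if_neg hc, if_neg hc]

theorem pvMain (l : List Char) :
    (l.foldl pvAStep (0, 0)).1 = pvBSum l l 0 := by
  induction l using List.reverseRecOn with
  | nil => simp [pvBSum, PySem.List.enumerate_nil]
  | append_singleton t c ih =>
    rw [List.foldl_append]
    rw [pvBSum_append (t ++ [c]) t c 0 rfl]
    rw [pvBSum_congr (t ++ [c]) t t (fun k hk => by rw [List.take_append_of_le_length hk])]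
    rw [← ih]
    simp only [List.foldl_cons, List.foldl_nil, pvAStep]
    by_cases h1 : c = '>'
    · simp [h1]
    · by_cases h2 : c = '<'
      · simp [h2, pvA_snd]
      · simp [h1, h2]

-- ===== VERDICT (by name: the statement is the Claim_ definition above) =====
theorem verifier_salut_spec : Claim_equal_verifier_salut := by
  intro corridor _
  unfold Spec_verifier_salut verifier_salut verifier_salut_alt
  exact pvMain corridor.toList
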